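-- pv_equiv track=rewrite | github.com/irekkkarimov/ManagementReportingAgent | agent/table_parser/base.py | merge_broken_numbers
-- ===== SOURCE A (Python) =====
-- from typing import List, Optional
--
-- def merge_broken_numbers(lines: List[str]) -> List[str]:
--     """
--     Склеивает числа в скобках, разорванные OCR на несколько строк:
--     '(37 033 242' + ')' -> '(37 033 242)'
--     """
--     merged = []
--     i = 0
--
--     while i < len(lines):
--         line = lines[i].strip()
--
--         if line.startswith("(") and not line.endswith(")"):
--             combined = line
--             j = i + 1
--             while j < len(lines):
--                 combined += lines[j].strip()
--                 if ")" in lines[j]: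
--                     break
--                 j += 1
--             merged.append(combined)
--             i = j + 1
--         else:
--             merged.append(line)
--             i += 1
--
--     return merged
-- ===== SOURCE B (Python) =====
-- from typing import List
--
-- def merge_broken_numbers(lines: List[str]) -> List[str]:
--     """Single-pass state machine: a boolean merge state carried through one
--     flat loop instead of nested index-jumping while-loops."""
--     merged: List[str] = []
--     combined = None
--     for line in lines:
--         s = line.strip()
--         if combined is None:
--             if s.startswith("(") and not s.endswith(")"):
--                 combined = s
--             else:
--                 merged.append(s)
--         else:
--             combined += s
--             if ")" in line:
--                 merged.append(combined)
--                 combined = None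
--     if combined is not None:
--         merged.append(combined)
--     return merged
-- ===== Notes on version B (the rewrite author's own statement) =====
-- stated objective: simpler
-- what changed: Replaced the nested index-jumping while-loops with a single flat pass carrying an optional pending 'combined' accumulator (a two-state machine), flushed once after the loop.
import Mathlib
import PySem

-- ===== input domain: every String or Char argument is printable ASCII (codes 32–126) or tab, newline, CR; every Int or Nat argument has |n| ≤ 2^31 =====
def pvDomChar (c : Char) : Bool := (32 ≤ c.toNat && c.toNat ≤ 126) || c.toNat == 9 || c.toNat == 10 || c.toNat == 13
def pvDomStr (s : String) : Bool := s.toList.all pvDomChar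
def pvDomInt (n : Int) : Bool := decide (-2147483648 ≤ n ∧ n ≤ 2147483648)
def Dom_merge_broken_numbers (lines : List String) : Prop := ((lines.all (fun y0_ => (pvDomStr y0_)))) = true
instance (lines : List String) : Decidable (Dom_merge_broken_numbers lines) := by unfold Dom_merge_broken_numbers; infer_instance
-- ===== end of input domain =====

-- B replaces A's nested index-jumping while-loops by one flat fold with an
-- optional pending accumulator (simpler decomposition, same O(n) cost).

-- ===== PORT A =====
-- Literal port of A: outer while over i, inner while over j accumulating
-- stripped lines until a line containing ")" (checked on the UNSTRIPPED line),
-- then resuming the outer loop after j.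
mutual
def merge_broken_numbers : List String → List String
  | [] => []
  | l :: rest =>
    let s := PySem.Str.strip l
    if PySem.Str.startswith s "(" && !(PySem.Str.endswith s ")") then
      mergeA_inner s rest
    else
      s :: merge_broken_numbers rest

def mergeA_inner (combined : String) : List String → List String
  | [] => [combined]
  | l :: rest =>
    let c := combined ++ PySem.Str.strip l
    if PySem.Str.isIn ")" l then
      c :: merge_broken_numbers rest
    else
      mergeA_inner c rest
end

-- ===== PORT B =====
-- Port of B: one fold over the lines; state = (output so far, optional pending
-- combined string); flush the pending string after the fold.
def mergeB_step (st : List String × Option String) (line : String) : List String × Option String :=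
  let s := PySem.Str.strip line
  match st.2 with
  | none =>
    if PySem.Str.startswith s "(" && !(PySem.Str.endswith s ")") then
      (st.1, some s)
    else
      (st.1 ++ [s], none)
  | some c =>
    let c' := c ++ s
    if PySem.Str.isIn ")" line then
      (st.1 ++ [c'], none)
    else
      (st.1, some c')

def merge_broken_numbers_alt (lines : List String) : List String :=
  let st := lines.foldl mergeB_step ([], none)
  match st.2 with
  | none => st.1
  | some c => st.1 ++ [c]

-- ===== PRECONDITION & SPEC =====
def Spec_merge_broken_numbers (lines : List String) (out : List String) : Prop := out = merge_broken_numbers_alt lines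
instance (lines : List String) (out : List String) : Decidable (Spec_merge_broken_numbers lines out) := by unfold Spec_merge_broken_numbers; infer_instance

-- ===== CLAIM (what is proved, stated in full; the proofs are below) =====
def Claim_equal_merge_broken_numbers : Prop := ∀ (lines : List String), Dom_merge_broken_numbers lines → Spec_merge_broken_numbers lines (merge_broken_numbers lines)

-- ===== LEMMAS AND PROOFS =====

def mergeB_flush (st : List String × Option String) : List String :=
  match st.2 with
  | none => st.1
  | some c => st.1 ++ [c]

theorem mergeB_joint (lines : List String) : ∀ (acc : List String) (p : Option String),
    mergeB_flush (lines.foldl mergeB_step (acc, p)) =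
      acc ++ (match p with
              | none => merge_broken_numbers lines
              | some c => mergeA_inner c lines) := by
  induction lines with
  | nil =>
    intro acc p
    cases p <;> simp [mergeB_flush, merge_broken_numbers, mergeA_inner]
  | cons l rest ih =>
    intro acc p
    cases p with
    | none =>
      by_cases h : (PySem.Str.startswith (PySem.Str.strip l) "(" &&
          !(PySem.Str.endswith (PySem.Str.strip l) ")")) = true
      · simp only [List.foldl_cons, mergeB_step, merge_broken_numbers, h,
          if_true, ih]
      · simp only [List.foldl_cons, mergeB_step, merge_broken_numbers, h,
          Bool.false_eq_true, if_false, ih, List.append_assoc,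
          List.singleton_append]
    | some c =>
      by_cases h : PySem.Str.isIn ")" l = true
      · simp only [List.foldl_cons, mergeB_step, mergeA_inner, h, if_true, ih,
          List.append_assoc, List.singleton_append]
      · simp only [List.foldl_cons, mergeB_step, mergeA_inner, h,
          Bool.false_eq_true, if_false, ih]

-- ===== VERDICT (by name: the statement is the Claim_ definition above) =====
theorem merge_broken_numbers_spec : Claim_equal_merge_broken_numbers := by
  intro lines _
  unfold Spec_merge_broken_numbers merge_broken_numbers_alt
  have h := mergeB_joint lines [] none
  simpa [mergeB_flush] using h.symm
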